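-- pv_equiv track=rewrite | github.com/scilla/pushswap42 | algo.py | how_sorted
-- ===== SOURCE A (Python) =====
-- def rotateA(stack_A, stack_B):
-- 	if len(stack_A) > 1:
-- 		tmp = stack_A[0] + 0
-- 		stack_A.append(tmp)
-- 		stack_A = stack_A[1:]
-- 	return stack_A, stack_B
--
-- def how_sorted(stack_A: list, stack_B):
-- 	res = 0
-- 	# if len(stack_A) and len(stack_B):
-- 	# 	res += abs(stack_A[0] + stack_B[0])
-- 	if len(stack_A) > 1:
-- 		stack_A = stack_A.copy()
-- 		while max(stack_A) != stack_A[-1]: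
-- 			stack_A, _ = rotateA(stack_A, None)
-- 		for i in range(1, len(stack_A)):
-- 			if stack_A[i] < stack_A[i-1]:
-- 				res += 1
-- 	if len(stack_B) > 1:
-- 		stack_B = stack_B.copy()
-- 		while max(stack_B) != stack_B[-1]:
-- 			stack_B, _ = rotateA(stack_B, None)
-- 		for i in range(1, len(stack_B)):
-- 			if stack_B[i] < stack_B[i-1]:
-- 				res += 1
-- 	return res
-- ===== SOURCE B (Python) =====
-- def _descents(s):
--     n = len(s)
--     if n <= 1:
--         return 0
--     m = max(s)
--     k = 0 if s[-1] == m else s.index(m) + 1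
--     r = s[k:] + s[:k]
--     return sum(1 for a, b in zip(r, r[1:]) if b < a)
--
-- def how_sorted(stack_A: list, stack_B):
--     return _descents(stack_A) + _descents(stack_B)
-- ===== Notes on version B (the rewrite author's own statement) =====
-- stated objective: faster
-- what changed: B computes the rotation offset directly (one max scan plus one index scan) and counts adjacent descents in a single zip pass over the rotated list, instead of A's while loop that re-scans for the max and rebuilds the list on every rotation.
import Mathlib
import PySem

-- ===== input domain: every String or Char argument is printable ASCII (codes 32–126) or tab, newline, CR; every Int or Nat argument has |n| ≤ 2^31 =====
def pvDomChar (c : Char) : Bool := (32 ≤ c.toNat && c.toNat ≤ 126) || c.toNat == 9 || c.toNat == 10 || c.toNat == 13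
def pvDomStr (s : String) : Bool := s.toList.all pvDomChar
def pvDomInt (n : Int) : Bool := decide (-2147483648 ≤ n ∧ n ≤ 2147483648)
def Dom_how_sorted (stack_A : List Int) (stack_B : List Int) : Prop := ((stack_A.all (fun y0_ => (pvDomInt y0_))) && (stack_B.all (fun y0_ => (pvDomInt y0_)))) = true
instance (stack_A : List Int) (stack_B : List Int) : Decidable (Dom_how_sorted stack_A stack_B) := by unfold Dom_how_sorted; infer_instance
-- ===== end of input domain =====

-- B replaces A's O(n^2) rotate-until-max-is-last loop by computing the rotation offset
-- directly (one max scan + one index scan) and counts descents in a single zip pass; objective: faster.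

-- ===== PORT A =====
-- rotateA(stack, None): moves the first element to the back (only the list result matters here).
def rotateA (s : List Int) : List Int :=
  if 1 < s.length then
    match PySem.List.pyGet? s 0 with          -- tmp = stack_A[0] + 0
    | some tmp => PySem.List.slice (s ++ [tmp + 0]) (some 1) none   -- append tmp; stack_A = stack_A[1:]
    | none => s                                -- unreachable: length > 1
  else s

-- 'while max(stack) != stack[-1]: rotate' — fuel-bounded recursion; fuel = length suffices
-- (the loop performs at most (first index of max)+1 < length rotations, proved in rotLoop_eq below).
def rotLoop : Nat → List Int → List Int
  | 0, s => s
  | f + 1, s =>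
    if PySem.List.max? s (fun x => x) ≠ PySem.List.pyGet? s (-1) then rotLoop f (rotateA s) else s

-- 'for i in range(1, len(stack)): if stack[i] < stack[i-1]: res += 1'
def descLoop (s : List Int) (res : Int) : Int :=
  (PySem.List.pyRange 1 (s.length : Int)).foldl
    (fun res i => if PySem.List.pyGetD s i 0 < PySem.List.pyGetD s (i - 1) 0 then res + 1 else res) res

def how_sorted (stack_A : List Int) (stack_B : List Int) : Int :=
  let res : Int := 0
  let res := if 1 < stack_A.length then descLoop (rotLoop stack_A.length stack_A) res else res
  let res := if 1 < stack_B.length then descLoop (rotLoop stack_B.length stack_B) res else res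
  res

-- ===== PORT B =====
-- _descents(s) from Source B: offset k computed directly, rotation built once, one zip pass.
def descentsAlt (s : List Int) : Int :=
  if s.length ≤ 1 then 0
  else
    match PySem.List.max? s (fun x => x) with   -- m = max(s); s nonempty here, so always `some`
    | none => 0
    | some m =>
      -- k = 0 if s[-1] == m else s.index(m) + 1 ; List.idxOf is exact for s.index since m ∈ s
      let k : Nat := if PySem.List.pyGet? s (-1) = some m then 0 else s.idxOf m + 1
      let r := s.drop k ++ s.take k             -- r = s[k:] + s[:k]  (exact: 0 ≤ k ≤ len(s))
      ((r.zip (r.drop 1)).countP (fun p => decide (p.2 < p.1)) : Int)  -- sum over zip(r, r[1:])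

def how_sorted_alt (stack_A : List Int) (stack_B : List Int) : Int :=
  descentsAlt stack_A + descentsAlt stack_B

-- ===== PRECONDITION & SPEC =====
def Spec_how_sorted (stack_A : List Int) (stack_B : List Int) (out : Int) : Prop := out = how_sorted_alt stack_A stack_B
instance (stack_A : List Int) (stack_B : List Int) (out : Int) : Decidable (Spec_how_sorted stack_A stack_B out) := by unfold Spec_how_sorted; infer_instance

-- ===== CLAIM (what is proved, stated in full; the proofs are below) =====
def Claim_equal_how_sorted : Prop := ∀ (stack_A : List Int) (stack_B : List Int), Dom_how_sorted stack_A stack_B → Spec_how_sorted stack_A stack_B (how_sorted stack_A stack_B)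

-- ===== LEMMAS AND PROOFS =====

-- the value max(s) computes on a nonempty list
def maxVal : List Int → Int
  | [] => 0
  | a :: t => t.foldl max a

-- the total number of rotations A's while loop performs
def offset (s : List Int) : Nat :=
  if PySem.List.pyGet? s (-1) = some (maxVal s) then 0 else s.idxOf (maxVal s) + 1

lemma max?_eq_maxVal (a : Int) (t : List Int) :
    PySem.List.max? (a :: t) (fun x => x) = some (maxVal (a :: t)) :=
  PySem.List.max?_id_cons a t

lemma pyGet?_neg_one {α : Type} (s : List α) (h : s ≠ []) :
    PySem.List.pyGet? s (-1) = s.getLast? := by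
  have hl : 1 ≤ s.length := by
    cases s with
    | nil => exact absurd rfl h
    | cons a t => simp
  simp only [PySem.List.pyGet?, PySem.List.pyIdx?]
  rw [if_neg (by omega), if_pos (by omega)]
  simp [List.getLast?_eq_getElem?]

lemma maxVal_mem (a : Int) (t : List Int) : maxVal (a :: t) ∈ a :: t :=
  PySem.List.max?_mem (max?_eq_maxVal a t)

lemma maxVal_isMax (a : Int) (t : List Int) : ∀ y ∈ a :: t, y ≤ maxVal (a :: t) := by
  intro y hy
  exact PySem.List.max?_isMax (key := fun x => x) (max?_eq_maxVal a t) y hy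

lemma maxVal_rot (a : Int) (t : List Int) (h : t ≠ []) :
    maxVal (t ++ [a]) = maxVal (a :: t) := by
  obtain ⟨c, t', rfl⟩ := List.exists_cons_of_ne_nil h
  apply le_antisymm
  · have hm := maxVal_mem c (t' ++ [a])
    apply maxVal_isMax a (c :: t')
    simp only [List.cons_append, List.mem_cons, List.mem_append] at hm ⊢
    tauto
  · have hm := maxVal_mem a (c :: t')
    apply maxVal_isMax c (t' ++ [a])
    simp only [List.mem_cons, List.mem_append] at hm ⊢
    tauto

lemma rotateA_eq (a : Int) (t : List Int) (h : t ≠ []) :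
    rotateA (a :: t) = t ++ [a] := by
  have hl : 1 ≤ t.length := by cases t with | nil => exact absurd rfl h | cons => simp
  unfold rotateA
  rw [if_pos (by simp; omega)]
  have h0 : PySem.List.pyGet? (a :: t) 0 = some a := by
    rw [show (0 : Int) = ((0 : Nat) : Int) from rfl, PySem.List.pyGet?_natCast]
    rfl
  rw [h0]
  show PySem.List.slice ((a :: t) ++ [a + 0]) (some 1) none = t ++ [a]
  rw [PySem.List.slice_from _ (by norm_num : (0:Int) ≤ 1)]
  simp

lemma rotLoop_eq : ∀ (fuel : Nat) (s : List Int), 1 < s.length → offset s ≤ fuel →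
    rotLoop fuel s = s.drop (offset s) ++ s.take (offset s) := by
  intro fuel
  induction fuel with
  | zero =>
    intro s _ hof
    have h0 : offset s = 0 := Nat.le_zero.mp hof
    simp [rotLoop, h0]
  | succ f ih =>
    intro s hs hof
    obtain ⟨a, t, rfl⟩ := List.exists_cons_of_ne_nil (show s ≠ [] by rintro rfl; simp at hs)
    have ht : t ≠ [] := by rintro rfl; simp at hs
    set M := maxVal (a :: t) with hM
    by_cases hlast : PySem.List.pyGet? (a :: t) (-1) = some M
    · have hof0 : offset (a :: t) = 0 := by simp [offset, ← hM, hlast]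
      rw [hof0]
      rw [rotLoop, if_neg (by rw [max?_eq_maxVal, ← hM, hlast]; simp), List.drop_zero, List.take_zero, List.append_nil]
    · have hcond : PySem.List.max? (a :: t) (fun x => x) ≠ PySem.List.pyGet? (a :: t) (-1) := by
        rw [max?_eq_maxVal, ← hM]; exact fun he => hlast he.symm
      have hrot : rotateA (a :: t) = t ++ [a] := rotateA_eq a t ht
      have hofS : offset (a :: t) = (a :: t).idxOf M + 1 := by simp [offset, ← hM, hlast]
      have hlen' : 1 < (t ++ [a]).length := by simpa using hs
      have hM' : maxVal (t ++ [a]) = M := maxVal_rot a t ht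
      have hMmem : M ∈ a :: t := maxVal_mem a t
      have hlastform : PySem.List.pyGet? (t ++ [a]) (-1) = some a := by
        rw [pyGet?_neg_one _ (by simp)]
        simp [List.getLast?_append]
      by_cases ha : a = M
      · -- first element is the max: one rotation finishes the loop
        have hj : (a :: t).idxOf M = 0 := by simp [ha]
        have hofS1 : offset (a :: t) = 1 := by rw [hofS, hj]
        have hof' : offset (t ++ [a]) = 0 := by
          rw [offset, if_pos (by rw [hlastform, hM', ha])]
        rw [rotLoop, if_pos hcond, hrot]
        rw [ih (t ++ [a]) hlen' (by omega)]
        rw [hof', hofS1]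
        simp
      · -- max is inside t: offset decreases by one
        have hMt : M ∈ t := by
          rcases List.mem_cons.mp hMmem with h | h
          · exact absurd h.symm ha
          · exact h
        have hjt : t.idxOf M < t.length := List.idxOf_lt_length_of_mem hMt
        have hj : (a :: t).idxOf M = t.idxOf M + 1 := by
          simp [ha]
        have hlast' : ¬ PySem.List.pyGet? (t ++ [a]) (-1) = some (maxVal (t ++ [a])) := by
          rw [hlastform, hM']
          intro he
          exact ha (Option.some.inj he)
        have hof' : offset (t ++ [a]) = t.idxOf M + 1 := by
          rw [offset, if_neg hlast', hM', List.idxOf_append, if_pos hMt]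
        rw [rotLoop, if_pos hcond, hrot]
        rw [ih (t ++ [a]) hlen' (by rw [hof']; rw [hofS, hj] at hof; omega)]
        rw [hof', hofS, hj]
        rw [List.drop_append_of_le_length (by omega), List.take_append_of_le_length (by omega)]
        simp [List.drop_succ_cons, List.take_succ_cons]

-- pyRange 1 (m+1) as a mapped Nat range
lemma pyRange_one_natCast (m : Nat) :
    PySem.List.pyRange 1 ((m + 1 : Nat) : Int) = (List.range m).map (fun k => ((k + 1 : Nat) : Int)) := by
  have h0 : PySem.List.pyRange 0 ((m + 1 : Nat) : Int) = 0 :: PySem.List.pyRange 1 ((m + 1 : Nat) : Int) := by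
    have := PySem.List.pyRange_one_cons (a := 0) (b := ((m + 1 : Nat) : Int)) (by push_cast; omega)
    simpa using this
  have h1 := PySem.List.pyRange_zero_natCast (m + 1)
  rw [h0, List.range_succ_eq_map] at h1
  simp only [List.map_cons, Nat.cast_zero, List.map_map] at h1
  have := (List.cons.injEq _ _ _ _).mp h1
  rw [this.2]
  rfl

-- the index-based descent count equals the pairwise zip count
lemma countP_range_zip : ∀ (s : List Int),
    (List.range (s.length - 1)).countP (fun k => decide (s.getD (k + 1) 0 < s.getD k 0)) =
      (s.zip (s.drop 1)).countP (fun p => decide (p.2 < p.1)) := by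
  intro s
  induction s with
  | nil => rfl
  | cons a t ih =>
    cases t with
    | nil => rfl
    | cons b t' =>
      have hlen : (a :: b :: t').length - 1 = (b :: t').length - 1 + 1 := by simp
      rw [hlen, List.range_succ_eq_map]
      rw [List.countP_cons, List.countP_map]
      have hcomp : ((fun k => decide ((a :: b :: t').getD (k + 1) 0 < (a :: b :: t').getD k 0)) ∘ Nat.succ)
          = fun k => decide ((b :: t').getD (k + 1) 0 < (b :: t').getD k 0) := by
        funext k
        simp [List.getD]
      rw [hcomp, ih]
      have hzip : (a :: b :: t').zip ((a :: b :: t').drop 1) = (a, b) :: (b :: t').zip ((b :: t').drop 1) := by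
        cases t' <;> rfl
      rw [hzip, List.countP_cons]
      rfl

lemma descLoop_eq (s : List Int) (res : Int) :
    descLoop s res = res + ((s.zip (s.drop 1)).countP (fun p => decide (p.2 < p.1)) : Int) := by
  cases s with
  | nil => simp [descLoop]
  | cons a t =>
    unfold descLoop
    have hlen : ((a :: t).length : Int) = ((t.length + 1 : Nat) : Int) := by simp
    rw [hlen, pyRange_one_natCast, List.foldl_map]
    have hbody : (fun (res : Int) (k : Nat) =>
        if PySem.List.pyGetD (a :: t) ((k + 1 : Nat) : Int) 0 < PySem.List.pyGetD (a :: t) (((k + 1 : Nat) : Int) - 1) 0 then res + 1 else res)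
        = fun (res : Int) (k : Nat) =>
        if (a :: t).getD (k + 1) 0 < (a :: t).getD k 0 then res + 1 else res := by
      funext res k
      have h1 : (((k + 1 : Nat) : Int) - 1) = ((k : Nat) : Int) := by push_cast; ring
      rw [h1, PySem.List.pyGetD_natCast, PySem.List.pyGetD_natCast]
    rw [hbody]
    rw [PySem.List.foldl_ite_add_one (p := fun k : Nat => (a :: t).getD (k + 1) 0 < (a :: t).getD k 0)]
    congr 1
    have := countP_range_zip (a :: t)
    simp only [List.length_cons, Nat.add_sub_cancel] at this
    rw [← this]

-- one side of how_sorted equals res + descentsAlt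
lemma side_eq (s : List Int) (res : Int) :
    (if 1 < s.length then descLoop (rotLoop s.length s) res else res) = res + descentsAlt s := by
  by_cases hs : 1 < s.length
  · rw [if_pos hs]
    obtain ⟨a, t, rfl⟩ := List.exists_cons_of_ne_nil (show s ≠ [] by rintro rfl; simp at hs)
    have hof : offset (a :: t) ≤ (a :: t).length := by
      unfold offset
      split
      · omega
      · have := List.idxOf_lt_length_of_mem (maxVal_mem a t)
        omega
    rw [rotLoop_eq _ _ hs hof, descLoop_eq]
    congr 1
    unfold descentsAlt
    rw [if_neg (by omega)]
    rw [max?_eq_maxVal]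
    rfl
  · rw [if_neg hs]
    have h0 : descentsAlt s = 0 := by unfold descentsAlt; rw [if_pos (by omega)]
    rw [h0, add_zero]

-- ===== VERDICT (by name: the statement is the Claim_ definition above) =====
theorem how_sorted_spec : Claim_equal_how_sorted := by
  intro A B _
  show how_sorted A B = how_sorted_alt A B
  unfold how_sorted how_sorted_alt
  simp only [side_eq]
  ring
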